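-- pv_equiv track=rewrite | github.com/GeekGames74/Discord-Bots | Modules/edt/edt.py | truncate_one
-- ===== SOURCE A (Python) =====
-- def truncate_one(subjects: list[str]) -> (int, int):
--     """Return index at which a corresponding timetable should be truncated (by slicing)."""
--     early, late = 0, len(subjects)
--     for i in range(len(subjects)):
--         if subjects[i] and not subjects[i].isspace():
--             early = i
--             break
--     for i in range(len(subjects)-1, -1, -1):
--         if subjects[i] and not subjects[i].isspace():
--             late = i+1
--             break
--     return (early, late)
-- ===== SOURCE B (Python) =====
-- def truncate_one(subjects: list[str]) -> (int, int):
--     """Return index at which a corresponding timetable should be truncated (by slicing)."""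
--     hits = [i for i, s in enumerate(subjects) if s and not s.isspace()]
--     if hits:
--         return (hits[0], hits[-1] + 1)
--     return (0, len(subjects))
-- ===== Notes on version B (the rewrite author's own statement) =====
-- stated objective: simpler
-- what changed: Replaces the two separate early-breaking bidirectional scans with one forward comprehension that collects all non-blank indices and reads its first and last endpoints (defaults (0, len) when empty).
import Mathlib
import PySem

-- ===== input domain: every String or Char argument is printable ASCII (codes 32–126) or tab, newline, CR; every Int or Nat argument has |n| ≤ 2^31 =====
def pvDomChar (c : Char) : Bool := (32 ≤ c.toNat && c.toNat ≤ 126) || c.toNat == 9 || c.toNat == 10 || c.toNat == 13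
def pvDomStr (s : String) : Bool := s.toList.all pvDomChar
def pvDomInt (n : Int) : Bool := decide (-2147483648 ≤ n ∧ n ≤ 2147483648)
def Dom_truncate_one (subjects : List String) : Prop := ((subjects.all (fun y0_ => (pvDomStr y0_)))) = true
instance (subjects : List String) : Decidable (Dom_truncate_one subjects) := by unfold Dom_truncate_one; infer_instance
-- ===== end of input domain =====

-- B replaces A's two early-breaking bidirectional scans with one forward pass that
-- collects all non-blank indices and reads its endpoints; objective: simpler.

-- shared blank test: Python's `s and not s.isspace()`
def pvKeep (s : String) : Bool := !s.toList.isEmpty && !(PySem.Str.strIsspace s)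

-- ===== PORT A =====
-- first loop: forward scan, break at first non-blank index
def truncFwd : List String → Int → Option Int
  | [], _ => none
  | s :: rest, i => if pvKeep s then some i else truncFwd rest (i + 1)

-- second loop: backward scan over indices n-1, …, 0, break at first non-blank
def truncBack (subjects : List String) : Nat → Option Int
  | 0 => none
  | n + 1 => if pvKeep (subjects.getD n "") then some ((n : Int) + 1) else truncBack subjects n

def truncate_one (subjects : List String) : Int × Int :=
  ((truncFwd subjects 0).getD 0,
   (truncBack subjects subjects.length).getD (subjects.length : Int))

-- ===== PORT B =====
def truncate_one_alt (subjects : List String) : Int × Int :=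
  let hits : List Int :=
    ((PySem.List.enumerate subjects 0).filter (fun p => pvKeep p.2)).map (·.1)
  match hits with
  | [] => ((0 : Int), (subjects.length : Int))
  | f :: rest => (f, rest.getLastD f + 1)   -- hits[-1] = last of f :: rest

-- ===== PRECONDITION & SPEC =====
def Spec_truncate_one (subjects : List String) (out : Int × Int) : Prop := out = truncate_one_alt subjects
instance (subjects : List String) (out : Int × Int) : Decidable (Spec_truncate_one subjects out) := by unfold Spec_truncate_one; infer_instance

-- ===== CLAIM (what is proved, stated in full; the proofs are below) =====
def Claim_equal_truncate_one : Prop := ∀ (subjects : List String), Dom_truncate_one subjects → Spec_truncate_one subjects (truncate_one subjects)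

-- ===== LEMMAS AND PROOFS =====

def pvHits (xs : List String) (n : Int) : List Int :=
  ((PySem.List.enumerate xs n).filter (fun p => pvKeep p.2)).map (·.1)

theorem pvHits_nil (n : Int) : pvHits [] n = [] := by
  simp [pvHits, PySem.List.enumerate_nil]

theorem pvHits_cons (x : String) (xs : List String) (n : Int) :
    pvHits (x :: xs) n = (if pvKeep x then [n] else []) ++ pvHits xs (n + 1) := by
  simp [pvHits, PySem.List.enumerate_cons, List.filter_cons]
  split <;> simp

theorem truncFwd_eq (xs : List String) (n : Int) :
    truncFwd xs n = (pvHits xs n).head? := by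
  induction xs generalizing n with
  | nil => simp [truncFwd, pvHits_nil]
  | cons x xs ih =>
    rw [pvHits_cons]
    by_cases h : pvKeep x <;> simp [truncFwd, h, ih]

theorem pvHits_append (xs ys : List String) (n : Int) :
    pvHits (xs ++ ys) n = pvHits xs n ++ pvHits ys (n + xs.length) := by
  simp [pvHits, PySem.List.enumerate_append]

theorem truncBack_eq (xs : List String) (n : Nat) (hn : n ≤ xs.length) :
    truncBack xs n = ((pvHits (xs.take n) 0).getLast?).map (· + 1) := by
  induction n with
  | zero => simp [truncBack, pvHits_nil]
  | succ m ih =>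
    have hm : m < xs.length := hn
    have htake : xs.take (m + 1) = xs.take m ++ [xs[m]] := by
      rw [List.take_add_one]
      simp [List.getElem?_eq_getElem hm]
    have hget : xs.getD m "" = xs[m] := by
      simp [List.getD, List.getElem?_eq_getElem hm]
    rw [truncBack, htake, pvHits_append, hget]
    have hlen : (xs.take m).length = m := List.length_take_of_le (le_of_lt hm)
    by_cases h : pvKeep xs[m]
    · simp [h, pvHits_cons, pvHits_nil, hlen]
    · simp [h, pvHits_cons, pvHits_nil, ih (le_of_lt hm)]

theorem truncate_one_spec : Claim_equal_truncate_one := by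
  intro subjects _
  unfold Spec_truncate_one truncate_one truncate_one_alt
  rw [truncFwd_eq, truncBack_eq subjects subjects.length le_rfl, List.take_length]
  have h2 : List.map (fun x => x.1) (List.filter (fun p => pvKeep p.2) (PySem.List.enumerate subjects)) = pvHits subjects 0 := rfl
  show ((pvHits subjects 0).head?.getD 0,
        (((pvHits subjects 0).getLast?).map (· + 1)).getD (subjects.length : Int)) = _
  rw [h2]
  cases h : pvHits subjects 0 with
  | nil => simp
  | cons f rest =>
    simp only [List.getLastD_eq_getLast?]
    cases rest with
    | nil => simp
    | cons b bs => simp [List.getLast_cons, List.getLast?_eq_some_getLast]
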